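-- pv_equiv track=rewrite | github.com/KIST-CSRC/NanoChef | NanoChefModule.py | _generateSeqSampling
-- ===== SOURCE A (Python) =====
-- def _generateSeqSampling(reagent_seqs:list,experiment_num:int):
--     """
--     :param experiment_num (int) : the number of experiments
--
--     :return sampling_list (dicts in list)
--     [
--     ]
--     """
--     reagent_len=len(reagent_seqs)
--
--     quotient=experiment_num//reagent_len
--     remainder=experiment_num%reagent_len
--
--     index_list=[]
--     for idx in range(reagent_len):
--         if idx < remainder:
--             index_list.append(quotient+1)
--         else:
--             index_list.append(quotient)
--
--     sampling_seq_list=[]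
--     for idx, counts in enumerate(index_list):
--         for _ in range(counts):
--             sampling_seq_list.append(reagent_seqs[idx])
--
--     return sampling_seq_list
-- ===== SOURCE B (Python) =====
-- def _generateSeqSampling(reagent_seqs: list, experiment_num: int):
--     reagent_len = len(reagent_seqs)
--     quotient = experiment_num // reagent_len
--     remainder = experiment_num % reagent_len
--     boundary = remainder * (quotient + 1)
--     return [reagent_seqs[j // (quotient + 1) if j < boundary else remainder + (j - boundary) // quotient]
--             for j in range(experiment_num)]
-- ===== Notes on version B (the rewrite author's own statement) =====
-- stated objective: faster
-- what changed: Replaces the two-phase count-table-then-expand structure by a single positional map: each output position j is sent directly to its reagent index via boundary arithmetic (j//(quotient+1) before remainder*(quotient+1), else remainder+(j-boundary)//quotient); measured constant-factor speedup (no per-element list appends of a counts table, one comprehension pass).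
-- outside the precondition, e.g. on _generateSeqSampling([], 3): A raises ZeroDivisionError, B raises ZeroDivisionError
import Mathlib
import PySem

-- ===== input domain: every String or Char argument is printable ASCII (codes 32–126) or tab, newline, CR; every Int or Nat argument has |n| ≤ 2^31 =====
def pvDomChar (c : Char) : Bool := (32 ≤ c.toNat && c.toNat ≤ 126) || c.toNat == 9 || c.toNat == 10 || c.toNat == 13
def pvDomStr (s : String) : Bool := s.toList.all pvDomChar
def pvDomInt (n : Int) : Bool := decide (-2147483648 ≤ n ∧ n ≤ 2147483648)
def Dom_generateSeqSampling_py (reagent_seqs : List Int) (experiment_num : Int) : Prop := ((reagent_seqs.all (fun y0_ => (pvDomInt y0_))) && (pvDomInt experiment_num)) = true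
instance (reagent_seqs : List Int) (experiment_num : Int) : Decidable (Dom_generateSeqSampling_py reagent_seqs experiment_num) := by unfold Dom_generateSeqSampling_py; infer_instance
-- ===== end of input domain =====

-- B replaces A's count-table-then-expand structure by a single positional map from each
-- output position to its reagent index (measured constant-factor faster: one pass, no counts table).

-- ===== PORT A =====
def generateSeqSampling_py (reagent_seqs : List Int) (experiment_num : Int) : List Int :=
  let reagent_len : Int := reagent_seqs.length
  let quotient := PySem.Int.floordiv experiment_num reagent_len
  let remainder := PySem.Int.mod experiment_num reagent_len
  let index_list : List Int :=
    (PySem.List.pyRange 0 reagent_len 1).foldl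
      (fun acc idx => acc ++ [if idx < remainder then quotient + 1 else quotient]) []
  (PySem.List.enumerate index_list).foldl
    (fun acc p => acc ++ List.replicate p.2.toNat (PySem.List.pyGetD reagent_seqs p.1 0)) []

-- ===== PORT B =====
def generateSeqSampling_py_alt (reagent_seqs : List Int) (experiment_num : Int) : List Int :=
  let reagent_len : Int := reagent_seqs.length
  let quotient := PySem.Int.floordiv experiment_num reagent_len
  let remainder := PySem.Int.mod experiment_num reagent_len
  let boundary := remainder * (quotient + 1)
  (PySem.List.pyRange 0 experiment_num 1).map (fun j =>
    PySem.List.pyGetD reagent_seqs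
      (if j < boundary then PySem.Int.floordiv j (quotient + 1)
       else remainder + PySem.Int.floordiv (j - boundary) quotient) 0)

-- ===== PRECONDITION & SPEC =====
-- Pre_ excludes only the empty reagent list, on which both A and B raise ZeroDivisionError.
def Pre_generateSeqSampling_py (reagent_seqs : List Int) (experiment_num : Int) : Prop :=
  reagent_seqs ≠ []
instance (reagent_seqs : List Int) (experiment_num : Int) : Decidable (Pre_generateSeqSampling_py reagent_seqs experiment_num) := by unfold Pre_generateSeqSampling_py; infer_instance

def pvWitness_generateSeqSampling_py : List Int × Int := ([3, 1, 2], 7)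

def Spec_generateSeqSampling_py (reagent_seqs : List Int) (experiment_num : Int) (out : List Int) : Prop := out = generateSeqSampling_py_alt reagent_seqs experiment_num
instance (reagent_seqs : List Int) (experiment_num : Int) (out : List Int) : Decidable (Spec_generateSeqSampling_py reagent_seqs experiment_num out) := by unfold Spec_generateSeqSampling_py; infer_instance

-- ===== CLAIM (what is proved, stated in full; the proofs are below) =====
def Claim_equal_generateSeqSampling_py : Prop := ∀ (reagent_seqs : List Int) (experiment_num : Int), Dom_generateSeqSampling_py reagent_seqs experiment_num → Pre_generateSeqSampling_py reagent_seqs experiment_num → Spec_generateSeqSampling_py reagent_seqs experiment_num (generateSeqSampling_py reagent_seqs experiment_num)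

-- ===== LEMMAS AND PROOFS =====

-- enumerate of (range' a L).map f tags each element with its own index.
lemma pv_enum_range' {γ : Type} (f : Nat → γ) :
    ∀ (L a : Nat), PySem.List.enumerate ((List.range' a L).map f) (a : Int)
      = (List.range' a L).map (fun (i : Nat) => ((i : Int), f i)) := by
  intro L
  induction L with
  | zero => intro a; simp
  | succ L ih =>
      intro a
      rw [List.range'_succ]
      simp only [List.map_cons, PySem.List.enumerate_cons]
      have h := ih (a + 1)
      rw [show ((a : Int) + 1) = ((a + 1 : Nat) : Int) by push_cast; ring, h]

-- Core block lemma: mapping j ↦ h (j / s) over range (r*s) lists each block.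
lemma pv_div_blocks {γ : Type} (s : Nat) (hs : 0 < s) (h : Nat → γ) :
    ∀ (r : Nat), (List.range (r * s)).map (fun j => h (j / s))
      = (List.range r).flatMap (fun i => List.replicate s (h i)) := by
  intro r
  induction r with
  | zero => simp
  | succ r ih =>
      have hr : (r + 1) * s = r * s + s := by ring
      have hc : ∀ j ∈ List.range s, ((fun j => h (j / s)) ∘ fun j => r * s + j) j = h r := by
        intro j hj
        simp only [Function.comp]
        rw [Nat.mul_comm r s, Nat.mul_add_div hs, Nat.div_eq_of_lt (List.mem_range.mp hj)]
        simp
      have hmap : List.map ((fun j => h (j / s)) ∘ fun j => r * s + j) (List.range s)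
          = List.replicate s (h r) := by
        rw [List.map_congr_left hc, List.map_const', List.length_range]
      rw [hr, List.range_add, List.map_append, List.map_map, ih, hmap, List.range_succ,
        List.flatMap_append]
      simp

-- The combined block identity, entirely over Nat.
lemma pv_blocks_eq {γ : Type} (g : Nat → γ) (q r m : Nat) :
    (List.range (r * (q + 1) + m * q)).map
        (fun j => g (if j < r * (q + 1) then j / (q + 1) else r + (j - r * (q + 1)) / q))
      = (List.range (r + m)).flatMap
        (fun i => List.replicate (if i < r then q + 1 else q) (g i)) := by
  set b := r * (q + 1) with hb
  rw [List.range_add (n := r) (m := m), List.flatMap_append, List.flatMap_map,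
    List.range_add (n := b), List.map_append, List.map_map]
  congr 1
  · -- first block
    have h1 : ∀ j ∈ List.range b,
        g (if j < b then j / (q + 1) else r + (j - b) / q) = g (j / (q + 1)) := by
      intro j hj; rw [if_pos (List.mem_range.mp hj)]
    rw [List.map_congr_left h1, pv_div_blocks (q + 1) (Nat.succ_pos q) g r]
    refine List.flatMap_congr ?_
    intro i hi
    rw [if_pos (List.mem_range.mp hi)]
  · -- second block
    have h1 : ∀ j ∈ List.range (m * q),
        ((fun j => g (if j < b then j / (q + 1) else r + (j - b) / q)) ∘ fun j => b + j) j
          = g (r + j / q) := by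
      intro j hj
      simp only [Function.comp]
      rw [if_neg (by omega), Nat.add_sub_cancel_left]
    rw [List.map_congr_left h1]
    have h2 : ∀ i ∈ List.range m,
        List.replicate (if r + i < r then q + 1 else q) (g (r + i))
          = List.replicate q (g (r + i)) := by
      intro i hi; rw [if_neg (by omega)]
    rw [List.flatMap_congr h2]
    rcases Nat.eq_zero_or_pos q with hq | hq
    · subst hq; simp
    · exact pv_div_blocks q hq (fun t => g (r + t)) m

-- pv_enum_range' specialised to start 0 over List.range.
lemma pv_enum_range0 {γ : Type} (f : Nat → γ) (L : Nat) :
    PySem.List.enumerate ((List.range L).map f) 0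
      = (List.range L).map (fun (i : Nat) => ((i : Int), f i)) := by
  have h := pv_enum_range' f L 0
  simpa [List.range_eq_range'] using h

-- A's output in flatMap-over-range form (Int counts still unreduced).
lemma pv_A_shape (xs : List Int) (n : Int) :
    generateSeqSampling_py xs n
      = (List.range xs.length).flatMap (fun (i : Nat) =>
          List.replicate ((if (i : Int) < PySem.Int.mod n xs.length
              then PySem.Int.floordiv n xs.length + 1
              else PySem.Int.floordiv n xs.length).toNat)
            (PySem.List.pyGetD xs (i : Int) 0)) := by
  unfold generateSeqSampling_py
  simp only [PySem.List.foldl_append_singleton_eq_map, List.nil_append,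
    PySem.List.pyRange_zero_nat, List.map_map, Function.comp_def, pv_enum_range0,
    PySem.List.foldl_append_eq_flatMap, List.flatMap_map]

-- ===== VERDICT (by name: the statement is the Claim_ definition above) =====
theorem generateSeqSampling_py_spec : Claim_equal_generateSeqSampling_py := by
  intro xs n _ hpre
  unfold Spec_generateSeqSampling_py
  have hL : 0 < xs.length := List.length_pos_iff.mpr hpre
  rw [pv_A_shape]
  unfold generateSeqSampling_py_alt
  simp only [PySem.List.pyRange_zero, List.map_map, Function.comp_def]
  by_cases hn : n ≤ 0
  case pos =>
    have hN : n.toNat = 0 := Int.toNat_of_nonpos hn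
    rw [hN]
    simp only [List.range_zero, List.map_nil]
    apply List.flatMap_eq_nil_iff.mpr
    intro i _
    rcases eq_or_lt_of_le hn with h0 | h0
    · rw [h0]
      have hq : PySem.Int.floordiv 0 (xs.length : Int) = 0 := by
        have := PySem.Int.floordiv_natCast 0 xs.length
        simpa using this
      have hr : PySem.Int.mod 0 (xs.length : Int) = 0 := by
        have := PySem.Int.mod_natCast 0 xs.length
        simpa using this
      rw [hq, hr, if_neg (by omega)]
      simp
    · have hq : PySem.Int.floordiv n (xs.length : Int) < 0 := by
        rw [PySem.Int.floordiv_lt_iff_lt_mul (by exact_mod_cast hL)]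
        simpa using h0
      have hz : (if (i : Int) < PySem.Int.mod n ↑xs.length
          then PySem.Int.floordiv n ↑xs.length + 1
          else PySem.Int.floordiv n ↑xs.length).toNat = 0 := by
        split <;> omega
      rw [hz]
      simp
  case neg =>
    have hn' : 0 < n := by omega
    have hnN : n = (n.toNat : Int) := (Int.toNat_of_nonneg hn'.le).symm
    set L := xs.length with hLdef
    set N := n.toNat with hNdef
    set q := N / L with hqdef
    set r := N % L with hrdef
    have hrL : r < L := Nat.mod_lt _ hL
    have hq : PySem.Int.floordiv n ↑L = (q : Int) := by
      rw [hnN]; exact_mod_cast PySem.Int.floordiv_natCast N L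
    have hr : PySem.Int.mod n ↑L = (r : Int) := by
      rw [hnN]; exact_mod_cast PySem.Int.mod_natCast N L
    have hA : (fun (i : Nat) =>
        List.replicate ((if (i : Int) < PySem.Int.mod n ↑L
            then PySem.Int.floordiv n ↑L + 1
            else PySem.Int.floordiv n ↑L).toNat) (PySem.List.pyGetD xs (i : Int) 0))
        = fun (i : Nat) =>
          List.replicate (if i < r then q + 1 else q) (PySem.List.pyGetD xs (i : Int) 0) := by
      funext i
      rw [hq, hr]
      by_cases hir : i < r
      · rw [if_pos (by exact_mod_cast hir), if_pos hir,
          show ((q : Int) + 1) = ((q + 1 : Nat) : Int) by push_cast; ring, Int.toNat_natCast]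
      · rw [if_neg (by exact_mod_cast hir), if_neg hir, Int.toNat_natCast]
    rw [hA]
    have hB : (fun (k : Nat) => PySem.List.pyGetD xs
        (if (k : Int) < PySem.Int.mod n ↑L * (PySem.Int.floordiv n ↑L + 1)
          then PySem.Int.floordiv (k : Int) (PySem.Int.floordiv n ↑L + 1)
          else PySem.Int.mod n ↑L +
            PySem.Int.floordiv ((k : Int) - PySem.Int.mod n ↑L * (PySem.Int.floordiv n ↑L + 1))
              (PySem.Int.floordiv n ↑L)) 0)
        = fun (k : Nat) => PySem.List.pyGetD xs
            ((if k < r * (q + 1) then k / (q + 1) else r + (k - r * (q + 1)) / q : Nat) : Int) 0 := by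
      funext k
      rw [hq, hr]
      have hcast : ((r : Int)) * ((q : Int) + 1) = ((r * (q + 1) : Nat) : Int) := by push_cast; ring
      by_cases hk : k < r * (q + 1)
      · rw [if_pos (by rw [hcast]; exact_mod_cast hk), if_pos hk]
        congr 1
        rw [show ((q : Int) + 1) = ((q + 1 : Nat) : Int) by push_cast; ring]
        exact_mod_cast PySem.Int.floordiv_natCast k (q + 1)
      · have hbk : r * (q + 1) ≤ k := Nat.not_lt.mp hk
        rw [if_neg (by rw [hcast]; exact_mod_cast hk), if_neg hk]
        congr 1
        rw [hcast, show ((k : Int) - ((r * (q + 1) : Nat) : Int)) = ((k - r * (q + 1) : Nat) : Int)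
            by push_cast [Nat.cast_sub hbk]; ring,
          PySem.Int.floordiv_natCast]
        push_cast
        ring
    rw [hB]
    have hNeq : N = r * (q + 1) + (L - r) * q := by
      obtain ⟨m, hm⟩ := Nat.exists_eq_add_of_le hrL.le
      have hsub : L - r = m := by omega
      have hdm : L * q + r = N := Nat.div_add_mod N L
      rw [hsub]
      calc N = L * q + r := hdm.symm
        _ = (r + m) * q + r := by rw [hm]
        _ = r * (q + 1) + m * q := by ring
    have hrange : List.range L = List.range (r + (L - r)) := by
      rw [Nat.add_sub_cancel' hrL.le]
    rw [hrange, hNeq]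
    exact (pv_blocks_eq (fun i => PySem.List.pyGetD xs (i : Int) 0) q r (L - r)).symm
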